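-- pv_equiv track=rewrite | github.com/maxcreations/vinyller | src/core/context_menu_handler.py | _get_common_artists
-- ===== SOURCE A (Python) =====
-- def _get_common_artists(tracks_list):
--     """
--     Finds and returns a sorted list of artists that are common to all tracks in the provided list.
--     """
--     if not tracks_list:
--         return []
--     first_track_artists = set(
--         artist for artist in tracks_list[0].get("artists", []) if artist
--     )
--     common_set = first_track_artists
--     for track in tracks_list[1:]:
--         track_artists = set(artist for artist in track.get("artists", []) if artist)
--         common_set.intersection_update(track_artists)
--         if not common_set:
--             return []
--     return sorted(list(common_set))
-- ===== SOURCE B (Python) =====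
-- def _get_common_artists(tracks_list):
--     """
--     Finds and returns a sorted list of artists that are common to all tracks in the provided list.
--     """
--     n = len(tracks_list)
--     counts = {}
--     for track in tracks_list:
--         for artist in dict.fromkeys(a for a in track.get("artists", []) if a):
--             counts[artist] = counts.get(artist, 0) + 1
--     return sorted(a for a, c in counts.items() if c == n)
-- ===== Notes on version B (the rewrite author's own statement) =====
-- stated objective: alternative
-- what changed: Replaces the running set-intersection over tracks with a single counting pass: one dict counts, per track, each distinct non-falsy artist once, and the artists whose count equals len(tracks_list) are returned sorted.
import Mathlib
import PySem

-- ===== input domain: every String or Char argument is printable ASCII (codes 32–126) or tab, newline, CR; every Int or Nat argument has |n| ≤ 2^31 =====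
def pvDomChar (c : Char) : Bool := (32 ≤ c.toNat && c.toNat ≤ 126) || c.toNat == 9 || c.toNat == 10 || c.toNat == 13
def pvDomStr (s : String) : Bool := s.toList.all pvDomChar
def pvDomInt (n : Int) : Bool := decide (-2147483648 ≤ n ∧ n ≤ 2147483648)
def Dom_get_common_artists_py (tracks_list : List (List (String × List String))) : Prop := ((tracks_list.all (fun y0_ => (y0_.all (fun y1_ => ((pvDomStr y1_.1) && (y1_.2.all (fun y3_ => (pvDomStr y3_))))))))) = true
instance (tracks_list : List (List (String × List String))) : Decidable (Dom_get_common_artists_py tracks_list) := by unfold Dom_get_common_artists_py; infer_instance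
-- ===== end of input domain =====

-- B replaces A's running set intersection over the tracks by a single counting pass
-- (one dict counting each distinct truthy artist once per track, keeping those whose
-- count equals the number of tracks); an alternative of the same cost.

-- the expression 'artist for artist in track.get("artists", []) if artist', shared by both sources
def pvTrackArtists (track : List (String × List String)) : List String :=
  ((PySem.Dict.mk track).getD "artists" []).filter (fun a => !(a == ""))

-- ===== PORT A =====
-- the for-loop over tracks_list[1:] with its early 'return []'
def pvAGo (common : PySem.Set String) :
    List (List (String × List String)) → List String
  | [] => PySem.List.sorted common (fun x => x)
  | track :: rest =>
      let track_artists := PySem.Set.ofList (pvTrackArtists track)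
      let common' := PySem.Set.inter common track_artists
      if common' = [] then [] else pvAGo common' rest

def get_common_artists_py (tracks_list : List (List (String × List String))) : List String :=
  match tracks_list with
  | [] => []
  | t0 :: rest => pvAGo (PySem.Set.ofList (pvTrackArtists t0)) rest

-- ===== PORT B =====
def get_common_artists_py_alt (tracks_list : List (List (String × List String))) : List String :=
  let n : Int := tracks_list.length
  let counts : PySem.Dict String Int :=
    tracks_list.foldl
      (fun d track =>
        (PySem.List.dedup (pvTrackArtists track)).foldl
          (fun d a => d.insert a (d.getD a 0 + 1)) d)
      (PySem.Dict.mk [])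
  PySem.List.sorted ((counts.items.filter (fun p => p.2 == n)).map Prod.fst) (fun x => x)

-- ===== PRECONDITION & SPEC =====
def Spec_get_common_artists_py (tracks_list : List (List (String × List String))) (out : List String) : Prop := out = get_common_artists_py_alt tracks_list
instance (tracks_list : List (List (String × List String))) (out : List String) : Decidable (Spec_get_common_artists_py tracks_list out) := by unfold Spec_get_common_artists_py; infer_instance

-- ===== CLAIM (what is proved, stated in full; the proofs are below) =====
def Claim_equal_get_common_artists_py : Prop := ∀ (tracks_list : List (List (String × List String))), Dom_get_common_artists_py tracks_list → Spec_get_common_artists_py tracks_list (get_common_artists_py tracks_list)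

-- ===== LEMMAS AND PROOFS =====

-- per-track artist set
def pvS (track : List (String × List String)) : PySem.Set String :=
  PySem.Set.ofList (pvTrackArtists track)

theorem pv_inter_nil (t : PySem.Set String) : PySem.Set.inter ([] : List String) t = [] := by
  simp [PySem.Set.inter]

theorem pv_foldl_inter_nil (l : List (List (String × List String))) :
    l.foldl (fun c t => PySem.Set.inter c (pvS t)) [] = [] := by
  induction l with
  | nil => rfl
  | cons t l ih => simpa [pv_inter_nil] using ih

theorem pvAGo_eq (l : List (List (String × List String))) (c : PySem.Set String) :
    pvAGo c l =
      PySem.List.sorted (l.foldl (fun c t => PySem.Set.inter c (pvS t)) c) (fun x => x) := by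
  induction l generalizing c with
  | nil => rfl
  | cons t l ih =>
      show (if PySem.Set.inter c (pvS t) = [] then []
              else pvAGo (PySem.Set.inter c (pvS t)) l) =
          PySem.List.sorted
            (List.foldl (fun c t => PySem.Set.inter c (pvS t)) (PySem.Set.inter c (pvS t)) l)
            (fun x => x)
      by_cases h : PySem.Set.inter c (pvS t) = []
      · rw [if_pos h, h, pv_foldl_inter_nil]; rfl
      · rw [if_neg h, ih]

theorem pv_mem_foldl_inter (a : String) (l : List (List (String × List String)))
    (c : PySem.Set String) :
    a ∈ l.foldl (fun c t => PySem.Set.inter c (pvS t)) c ↔ a ∈ c ∧ ∀ t ∈ l, a ∈ pvS t := by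
  induction l generalizing c with
  | nil => simp
  | cons t l ih =>
      simp only [List.foldl_cons, ih, PySem.Set.mem_inter, List.mem_cons]
      constructor
      · rintro ⟨⟨hc, ht⟩, hrest⟩
        exact ⟨hc, fun u hu => hu.elim (fun e => e ▸ ht) (hrest u)⟩
      · rintro ⟨hc, hall⟩
        exact ⟨⟨hc, hall t (Or.inl rfl)⟩, fun u hu => hall u (Or.inr hu)⟩

theorem pv_nodup_foldl_inter (l : List (List (String × List String)))
    (c : PySem.Set String) (hc : c.Nodup) :
    (l.foldl (fun c t => PySem.Set.inter c (pvS t)) c).Nodup := by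
  induction l generalizing c with
  | nil => exact hc
  | cons t l ih => exact ih _ (PySem.Set.nodup_inter _ _ hc)

-- B's counting loop
def pvStep (d : PySem.Dict String Int) (track : List (String × List String)) :
    PySem.Dict String Int :=
  (PySem.List.dedup (pvTrackArtists track)).foldl (fun d a => d.insert a (d.getD a 0 + 1)) d

theorem pv_getD_step (d : PySem.Dict String Int) (t : List (String × List String)) (a : String) :
    (pvStep d t).getD a 0 = d.getD a 0 + (if a ∈ pvS t then 1 else 0) := by
  unfold pvStep
  rw [PySem.Dict.getD_foldl_insert_add_one]
  by_cases h : a ∈ pvS t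
  · have hm : a ∈ PySem.List.dedup (pvTrackArtists t) := by
      simpa [pvS, PySem.Set.mem_ofList] using h
    rw [List.count_eq_one_of_mem (by simp) hm]
    simp [h]
  · have hm : a ∉ PySem.List.dedup (pvTrackArtists t) := by
      simpa [pvS, PySem.Set.mem_ofList] using h
    rw [List.count_eq_zero_of_not_mem hm]
    simp [h]

theorem pv_getD_counts (l : List (List (String × List String))) (d : PySem.Dict String Int)
    (a : String) :
    (l.foldl pvStep d).getD a 0 = d.getD a 0 + l.countP (fun t => decide (a ∈ pvS t)) := by
  induction l generalizing d with
  | nil => simp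
  | cons t l ih =>
      rw [List.foldl_cons, ih, pv_getD_step, List.countP_cons]
      by_cases h : a ∈ pvS t
      · simp [h]; omega
      · simp [h]

theorem pv_keys_step (d : PySem.Dict String Int) (t : List (String × List String)) :
    (pvStep d t).keys = PySem.Set.update d.keys (PySem.List.dedup (pvTrackArtists t)) := by
  unfold pvStep
  exact PySem.Dict.keys_foldl_insert _ _ _

theorem pv_mem_keys_counts (l : List (List (String × List String))) (d : PySem.Dict String Int)
    (a : String) :
    a ∈ (l.foldl pvStep d).keys ↔ a ∈ d.keys ∨ ∃ t ∈ l, a ∈ pvS t := by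
  induction l generalizing d with
  | nil => simp
  | cons t l ih =>
      rw [List.foldl_cons, ih, pv_keys_step]
      simp only [PySem.Set.mem_update, PySem.List.mem_dedup, List.mem_cons]
      constructor
      · rintro (⟨h | h⟩ | ⟨u, hu, ha⟩)
        · exact Or.inl h
        · exact Or.inr ⟨t, Or.inl rfl, by simpa [pvS, PySem.Set.mem_ofList] using h⟩
        · exact Or.inr ⟨u, Or.inr hu, ha⟩
      · rintro (h | ⟨u, hu | hu, ha⟩)
        · exact Or.inl (Or.inl h)
        · exact Or.inl (Or.inr (by simpa [pvS, PySem.Set.mem_ofList, hu] using ha))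
        · exact Or.inr ⟨u, hu, ha⟩

theorem pv_nodup_keys_counts (l : List (List (String × List String)))
    (d : PySem.Dict String Int) (hd : d.keys.Nodup) :
    (l.foldl pvStep d).keys.Nodup := by
  induction l generalizing d with
  | nil => exact hd
  | cons t l ih =>
      exact ih _ (PySem.Dict.nodup_keys_foldl_insert _ _ _ hd)

-- membership in B's pre-sorted selection
theorem pv_mem_selection (d : PySem.Dict String Int) (hd : d.keys.Nodup) (n : Int) (a : String) :
    a ∈ (d.items.filter (fun p => p.2 == n)).map Prod.fst ↔ a ∈ d.keys ∧ d.getD a 0 = n := by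
  constructor
  · intro h
    rcases List.mem_map.1 h with ⟨p, hp, hfst⟩
    rcases List.mem_filter.1 hp with ⟨hpi, hpv⟩
    have hv : p.2 = n := by simpa using hpv
    subst hfst
    refine ⟨PySem.Dict.mem_keys_of_mem_items d hpi, ?_⟩
    rw [PySem.Dict.getD_of_mem_items d (by simpa using hpi) hd, hv]
  · rintro ⟨hk, hv⟩
    have hg : d.get? a = some n := by
      have hc : d.contains a = true := (PySem.Dict.contains_iff_mem_keys d a).2 hk
      rcases Option.isSome_iff_exists.1
        (by rw [← PySem.Dict.contains_eq_isSome_get? d a]; exact hc) with ⟨v, hv'⟩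
      have := PySem.Dict.getD_of_get?_eq_some d 0 hv'
      rw [hv', ← hv, this]
    have hitem : (a, n) ∈ d.items := PySem.Dict.mem_items_of_get?_eq_some d hg
    exact List.mem_map.2 ⟨(a, n), List.mem_filter.2 ⟨hitem, by simp⟩, rfl⟩

theorem pv_nodup_selection (d : PySem.Dict String Int) (hd : d.keys.Nodup) (n : Int) :
    ((d.items.filter (fun p => p.2 == n)).map Prod.fst).Nodup := by
  have hsub : List.Sublist ((d.items.filter (fun p => p.2 == n)).map Prod.fst)
      (d.items.map Prod.fst) :=
    List.filter_sublist.map Prod.fst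
  exact hd.sublist hsub

-- ===== VERDICT (by name: the statement is the Claim_ definition above) =====
theorem get_common_artists_py_spec : Claim_equal_get_common_artists_py := by
  intro tl _
  unfold Spec_get_common_artists_py
  match tl with
  | [] => rfl
  | t0 :: rest =>
      simp only [get_common_artists_py, get_common_artists_py_alt]
      rw [pvAGo_eq]
      have hfold : (t0 :: rest).foldl
          (fun d track => (PySem.List.dedup (pvTrackArtists track)).foldl
            (fun d a => d.insert a (d.getD a 0 + 1)) d) (PySem.Dict.mk []) =
          (t0 :: rest).foldl pvStep (PySem.Dict.mk []) := rfl
      rw [hfold]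
      set n : Int := ((t0 :: rest : List _).length : Int) with hn
      set counts := (t0 :: rest).foldl pvStep (PySem.Dict.mk []) with hcounts
      have hdk : counts.keys.Nodup := pv_nodup_keys_counts _ _ (by simp [PySem.Dict.keys])
      apply PySem.List.sorted_eq_sorted_of_perm _ _ _ (fun x y h => h)
      rw [List.perm_ext_iff_of_nodup
        (pv_nodup_foldl_inter _ _ (PySem.Set.nodup_ofList _))
        (pv_nodup_selection _ hdk n)]
      intro a
      rw [pv_mem_selection _ hdk, pv_mem_foldl_inter, pv_mem_keys_counts]
      rw [pv_getD_counts]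
      simp only [show ∀ b : String, (PySem.Dict.mk ([] : List (String × Int))).getD b 0 = 0
        from fun _ => rfl, zero_add]
      constructor
      · rintro ⟨h0, hrest⟩
        have hall : ∀ t ∈ t0 :: rest, a ∈ pvS t := by
          intro t ht
          rcases List.mem_cons.1 ht with h | h
          · exact h ▸ (by simpa [pvS] using h0)
          · exact hrest t h
        refine ⟨Or.inr ⟨t0, List.mem_cons_self, hall t0 List.mem_cons_self⟩, ?_⟩
        have : (t0 :: rest).countP (fun t => decide (a ∈ pvS t)) = (t0 :: rest).length :=
          List.countP_eq_length.2 (fun t ht => by simpa using hall t ht)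
        rw [hn]; exact_mod_cast this
      · rintro ⟨_, hcnt⟩
        have hcnt' : (t0 :: rest).countP (fun t => decide (a ∈ pvS t)) = (t0 :: rest).length := by
          have : ((t0 :: rest).countP (fun t => decide (a ∈ pvS t)) : Int) = n := by
            exact hcnt
          rw [hn] at this; exact_mod_cast this
        have hall := List.countP_eq_length.1 hcnt'
        refine ⟨by
          have h0 := hall t0 List.mem_cons_self
          simpa [pvS, PySem.Set.mem_ofList] using h0, ?_⟩
        intro t ht
        simpa using hall t (List.mem_cons_of_mem _ ht)
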